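-- pv_equiv track=rewrite | github.com/munkhdorj-m/Python-exercise-7-2-Loop-5 | assignment.py | count_digits_divisible_by_3
-- ===== SOURCE A (Python) =====
-- def count_digits_divisible_by_3(num):
--     n = num
--     count = 0
--
--     while n > 0:
--         digit = n % 10
--         if digit % 3 == 0:
--             count += 1
--         n //= 10
--
--     return count
-- ===== SOURCE B (Python) =====
-- def count_digits_divisible_by_3(num):
--     if num <= 0:
--         return 0
--     return sum(ch in ('0', '3', '6', '9') for ch in str(num))
-- ===== Notes on version B (the rewrite author's own statement) =====
-- stated objective: idiomatic
-- what changed: B replaces A's arithmetic while-loop (repeated %10 and //10 on a mutable accumulator) with a guard plus a one-line sum over the decimal string of num, testing each character against the digit set {'0','3','6','9'}.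
import Mathlib
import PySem

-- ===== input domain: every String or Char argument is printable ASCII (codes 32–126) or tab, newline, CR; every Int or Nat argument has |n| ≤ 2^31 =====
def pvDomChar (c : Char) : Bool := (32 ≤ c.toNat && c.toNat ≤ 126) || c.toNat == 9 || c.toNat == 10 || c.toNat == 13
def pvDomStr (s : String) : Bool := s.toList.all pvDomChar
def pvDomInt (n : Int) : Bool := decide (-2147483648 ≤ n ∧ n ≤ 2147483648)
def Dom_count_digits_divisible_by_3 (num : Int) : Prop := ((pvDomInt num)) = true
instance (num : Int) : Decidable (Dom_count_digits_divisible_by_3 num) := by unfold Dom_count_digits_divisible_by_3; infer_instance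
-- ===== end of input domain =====

-- B counts the digit characters of str(num) lying in {'0','3','6','9'} (with A's num > 0 guard)
-- instead of A's %10 / //10 arithmetic loop; objective: idiomatic one-liner, same cost.

-- ===== PORT A =====
-- the while-loop of A: state (n, count)
def pvALoop (n count : Int) : Int :=
  if _ : 0 < n then
    let digit := PySem.Int.mod n 10
    let count' := if PySem.Int.mod digit 3 = 0 then count + 1 else count
    pvALoop (PySem.Int.floordiv n 10) count'
  else count
termination_by n.toNat
decreasing_by
  simp only [PySem.Int.floordiv_eq_ediv_of_pos (by norm_num : (0:Int) < 10)]
  omega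

def count_digits_divisible_by_3 (num : Int) : Int :=
  pvALoop num 0

-- ===== PORT B =====
def count_digits_divisible_by_3_alt (num : Int) : Int :=
  if num ≤ 0 then 0
  else ((PySem.Int.toChars num).countP (fun ch => ['0', '3', '6', '9'].contains ch) : Int)

-- ===== PRECONDITION & SPEC =====
def Spec_count_digits_divisible_by_3 (num : Int) (out : Int) : Prop := out = count_digits_divisible_by_3_alt num
instance (num : Int) (out : Int) : Decidable (Spec_count_digits_divisible_by_3 num out) := by unfold Spec_count_digits_divisible_by_3; infer_instance

-- ===== CLAIM (what is proved, stated in full; the proofs are below) =====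
def Claim_equal_count_digits_divisible_by_3 : Prop := ∀ (num : Int), Dom_count_digits_divisible_by_3 num → Spec_count_digits_divisible_by_3 num (count_digits_divisible_by_3 num)

-- ===== LEMMAS AND PROOFS =====

-- A's loop, on a natural number, accumulates the count of base-10 digits divisible by 3.
theorem pvALoop_digits (n : Nat) : ∀ c : Int,
    pvALoop (n : Int) c = c + ((Nat.digits 10 n).countP (fun d => d % 3 == 0) : Int) := by
  induction n using Nat.strong_induction_on with
  | _ n ih =>
    intro c
    by_cases hn : 0 < n
    · rw [pvALoop, dif_pos (show (0:Int) < (n:Int) by exact_mod_cast hn)]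
      have hfd : PySem.Int.floordiv (n : Int) 10 = ((n / 10 : Nat) : Int) := by
        exact_mod_cast PySem.Int.floordiv_natCast n 10
      have hm : PySem.Int.mod (n : Int) 10 = ((n % 10 : Nat) : Int) := by
        exact_mod_cast PySem.Int.mod_natCast n 10
      rw [hfd, hm]
      have hmod : PySem.Int.mod ((n % 10 : Nat) : Int) 3 = ((n % 10 % 3 : Nat) : Int) := by
        exact_mod_cast PySem.Int.mod_natCast (n % 10) 3
      simp only [hmod]
      rw [ih (n / 10) (Nat.div_lt_self hn (by norm_num))]
      rw [Nat.digits_def' (by norm_num : 1 < 10) hn]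
      rw [List.countP_cons]
      by_cases h0 : n % 10 % 3 = 0
      · simp [h0]
        ring
      · simp [h0]
        omega
    · rw [pvALoop]
      have : n = 0 := by omega
      subst this
      simp

-- `Nat.toDigitsCore` with enough fuel produces the reversed `Nat.digits`, rendered by `Nat.digitChar`.
theorem toDigitsCore_eq_digits : ∀ (f n : Nat) (l : List Char), 0 < n → n < f →
    Nat.toDigitsCore 10 f n l = ((Nat.digits 10 n).map Nat.digitChar).reverse ++ l := by
  intro f
  induction f with
  | zero => intro n l hn hf; omega
  | succ f ih =>
    intro n l hn hf
    rw [Nat.toDigitsCore]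
    by_cases hdiv : n / 10 = 0
    · have hlt : n < 10 := by omega
      simp only [hdiv]
      simp only [if_true]
      rw [Nat.digits_def' (by norm_num : 1 < 10) hn]
      have : Nat.digits 10 (n / 10) = [] := by rw [hdiv]; simp
      rw [this]
      simp [Nat.mod_eq_of_lt hlt]
    · have hpos : 0 < n / 10 := Nat.pos_of_ne_zero hdiv
      have hlt : n / 10 < f := by
        have : n / 10 < n := Nat.div_lt_self hn (by norm_num)
        omega
      simp only [if_neg hdiv]
      rw [ih (n / 10) _ hpos hlt]
      rw [Nat.digits_def' (by norm_num : 1 < 10) hn]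
      simp

-- a single decimal digit renders into {'0','3','6','9'} exactly when it is divisible by 3
theorem digitChar_mem_iff (d : Nat) (hd : d < 10) :
    (['0', '3', '6', '9'].contains (Nat.digitChar d)) = (d % 3 == 0) := by
  interval_cases d <;> decide

theorem countP_toChars (n : Nat) (hn : 0 < n) :
    (PySem.Int.toChars (n : Int)).countP (fun ch => ['0', '3', '6', '9'].contains ch)
      = (Nat.digits 10 n).countP (fun d => d % 3 == 0) := by
  have hneg : ¬ ((n : Int) < 0) := by omega
  simp only [PySem.Int.toChars, if_neg hneg, Int.toNat_natCast]
  rw [Nat.toDigits, toDigitsCore_eq_digits (n + 1) n [] hn (by omega)]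
  rw [List.append_nil, List.countP_reverse, List.countP_map]
  apply List.countP_congr
  intro d hd
  have h := digitChar_mem_iff d (Nat.digits_lt_base (by norm_num) hd)
  simp only [Function.comp_apply, h]

-- ===== VERDICT (by name: the statement is the Claim_ definition above) =====
theorem count_digits_divisible_by_3_spec : Claim_equal_count_digits_divisible_by_3 := by
  intro num _
  unfold Spec_count_digits_divisible_by_3 count_digits_divisible_by_3 count_digits_divisible_by_3_alt
  by_cases h : num ≤ 0
  · rw [if_pos h, pvALoop]
    simp [not_lt.mpr h]
  · rw [if_neg h]
    have hpos : 0 < num := by omega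
    have hn : num = ((num.toNat : Nat) : Int) := by omega
    have hpn : 0 < num.toNat := by omega
    rw [hn, pvALoop_digits num.toNat 0, countP_toChars num.toNat hpn]
    simp
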